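-- pv_equiv track=rewrite | github.com/anbarief/Graphvy | graphvy.py | valid_coordinate
-- ===== SOURCE A (Python) =====
-- def valid_coordinate(text):
--     numbers_condition = "0123456789.-"
--     confirm = 1
--     for i in range(len(text)):
--         if not (text[i] in numbers_condition):
--             confirm = 0
--             break
--
--     if ('-' in text[1:]):
--         confirm = 0
--
--     if text.count('.') > 1:
--         confirm = 0
--
--     if text == "" or text == "." or text == "-" or text == "-.":
--         confirm = 0
--
--     if confirm == 1:
--         return True
--     else:
--         return False
-- ===== SOURCE B (Python) =====
-- def valid_coordinate(text):
--     body = text[1:] if text.startswith('-') else text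
--     digits = sum(1 for c in body if c in "0123456789")
--     dots = sum(1 for c in body if c == '.')
--     return 1 <= digits and digits + dots == len(body) and dots <= 1
-- ===== Notes on version B (the rewrite author's own statement) =====
-- stated objective: alternative
-- what changed: Replaces A's flag-based scan plus separate slice-membership, substring-count and four degenerate string-equality checks by a counting formulation: strip one optional leading minus sign, count digit and dot characters, and accept iff there is at least one digit, digits plus dots cover the whole remainder, and there is at most one dot.
import Mathlib
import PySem

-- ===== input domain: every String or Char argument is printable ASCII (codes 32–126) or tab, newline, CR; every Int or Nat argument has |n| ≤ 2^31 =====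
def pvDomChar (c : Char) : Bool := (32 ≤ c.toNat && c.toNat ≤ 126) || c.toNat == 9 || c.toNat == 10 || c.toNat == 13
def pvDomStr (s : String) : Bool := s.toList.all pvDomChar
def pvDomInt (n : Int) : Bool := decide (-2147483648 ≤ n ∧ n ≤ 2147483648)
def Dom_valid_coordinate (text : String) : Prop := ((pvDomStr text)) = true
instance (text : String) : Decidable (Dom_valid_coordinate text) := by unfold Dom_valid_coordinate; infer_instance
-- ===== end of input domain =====

-- B replaces A's scan-with-flag plus count/membership/degenerate-equality checks by a
-- counting formulation (strip optional '-', count digits and dots); same values everywhere.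

-- ===== PORT A =====
-- numbers_condition = "0123456789.-" (single-char 'in' on a string = char membership, exact)
def vcNumbers : List Char := ['0','1','2','3','4','5','6','7','8','9','.','-']

-- the for-loop over range(len(text)) with break: confirm starts at 1, becomes 0 and the
-- loop stops at the first char not in numbers_condition
def vcLoop : List Char → Int
  | [] => 1
  | c :: rest => if ¬ (c ∈ vcNumbers) then 0 else vcLoop rest

def valid_coordinate (text : String) : Bool :=
  let l := text.toList
  let confirm := vcLoop l
  -- '-' in text[1:]  (single-char 'in' = membership in the chars of the slice, exact)
  let confirm := if '-' ∈ l.drop 1 then 0 else confirm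
  -- text.count('.')  (single-char substring count = char count, exact)
  let confirm := if l.count '.' > 1 then 0 else confirm
  let confirm := if l = [] ∨ l = ['.'] ∨ l = ['-'] ∨ l = ['-', '.'] then 0 else confirm
  if confirm = 1 then true else false

-- ===== PORT B =====
def vcDigits : List Char := ['0','1','2','3','4','5','6','7','8','9']

def valid_coordinate_alt (text : String) : Bool :=
  let body := if PySem.Chars.startswith text.toList ['-'] then text.toList.drop 1
              else text.toList
  let digits := body.countP (fun c => c ∈ vcDigits)
  let dots := body.countP (fun c => c == '.')
  decide (1 ≤ digits) && (digits + dots == body.length) && decide (dots ≤ 1)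

-- ===== PRECONDITION & SPEC =====
def Spec_valid_coordinate (text : String) (out : Bool) : Prop := out = valid_coordinate_alt text
instance (text : String) (out : Bool) : Decidable (Spec_valid_coordinate text out) := by unfold Spec_valid_coordinate; infer_instance

-- ===== CLAIM (what is proved, stated in full; the proofs are below) =====
def Claim_equal_valid_coordinate : Prop := ∀ (text : String), Dom_valid_coordinate text → Spec_valid_coordinate text (valid_coordinate text)

-- ===== LEMMAS AND PROOFS =====

theorem vcLoop_eq_one_iff (l : List Char) : vcLoop l = 1 ↔ ∀ c ∈ l, c ∈ vcNumbers := by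
  induction l with
  | nil => simp [vcLoop]
  | cons c t ih =>
    by_cases h : c ∈ vcNumbers
    · simp [vcLoop, h, ih]
    · simp [vcLoop, h]

theorem vc_char_iff (c : Char) (hne : c ≠ '-') :
    c ∈ vcNumbers ↔ (c ∈ vcDigits ∨ c = '.') := by
  constructor
  · intro h
    simp only [vcNumbers, List.mem_cons, List.not_mem_nil, or_false] at h
    rcases h with h|h|h|h|h|h|h|h|h|h|h|h <;> subst h <;> simp [vcDigits] at hne ⊢
  · intro h
    rcases h with h|h
    · simp only [vcDigits, List.mem_cons, List.not_mem_nil, or_false] at h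
      rcases h with h|h|h|h|h|h|h|h|h|h <;> subst h <;> decide
    · subst h; decide

theorem vc_not_dash (c : Char) (h : c ∈ vcDigits ∨ c = '.') : c ≠ '-' := by
  rintro rfl
  rcases h with h | h
  · exact absurd h (by decide)
  · exact absurd h (by decide)

theorem vc_countP_split (m : List Char) (hall : ∀ c ∈ m, c ∈ vcDigits ∨ c = '.') :
    m.countP (fun c => c ∈ vcDigits) + m.countP (fun c => c == '.') = m.length := by
  induction m with
  | nil => simp
  | cons c t ih =>
    have ht := ih (fun x hx => hall x (by simp [hx]))
    by_cases hd : c ∈ vcDigits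
    · have hnd : ¬ (c == '.') = true := by
        simp only [beq_iff_eq]
        intro h; subst h; exact absurd hd (by decide)
      simp [hd, hnd, ← ht]
      omega
    · have hc' : c = '.' := (hall c (by simp)).resolve_left hd
      have hdn : ('.' : Char) ∉ vcDigits := by decide
      simp [hc', hdn, ← ht]
      omega

theorem vc_two_counts_le (m : List Char) :
    m.countP (fun c => c ∈ vcDigits) + m.countP (fun c => c == '.') ≤ m.length := by
  induction m with
  | nil => simp
  | cons c t ih =>
    simp only [List.countP_cons, List.length_cons]
    by_cases hd : c ∈ vcDigits
    · have hnd : (c == '.') = false := by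
        simp only [beq_eq_false_iff_ne]; intro hh; subst hh; exact absurd hd (by decide)
      simp [hd, hnd]; omega
    · by_cases hdot : (c == '.') = true <;> simp [hd, hdot] <;> omega

theorem vc_split_all (m : List Char)
    (h : m.countP (fun c => c ∈ vcDigits) + m.countP (fun c => c == '.') = m.length) :
    ∀ c ∈ m, c ∈ vcDigits ∨ c = '.' := by
  induction m with
  | nil => simp
  | cons c t ih =>
    have haux := vc_two_counts_le t
    simp only [List.countP_cons, List.length_cons] at h
    by_cases hd : c ∈ vcDigits
    · intro x hx
      rcases List.mem_cons.1 hx with rfl | hx'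
      · exact Or.inl hd
      · refine ih ?_ x hx'
        have hnd : (c == '.') = false := by
          simp only [beq_eq_false_iff_ne]; intro hh; subst hh; exact absurd hd (by decide)
        simp [hd, hnd] at h
        omega
    · by_cases hdot : (c == '.') = true
      · intro x hx
        rcases List.mem_cons.1 hx with rfl | hx'
        · exact Or.inr (by simpa using hdot)
        · refine ih ?_ x hx'
          simp [hd, hdot] at h
          omega
      · exfalso
        simp [hd, hdot] at h
        omega

theorem vc_digit_pos_iff (m : List Char)
    (hall : ∀ c ∈ m, c ∈ vcDigits ∨ c = '.')
    (hdot : m.countP (fun c => c == '.') ≤ 1) :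
    (1 ≤ m.countP (fun c => c ∈ vcDigits)) ↔ (m ≠ [] ∧ m ≠ ['.']) := by
  constructor
  · intro h
    constructor
    · rintro rfl; simp at h
    · rintro rfl; simp [vcDigits] at h
  · rintro ⟨hne, hnd⟩
    by_contra hz
    have hz0 : m.countP (fun c => decide (c ∈ vcDigits)) = 0 := by omega
    have halldot : ∀ c ∈ m, c = '.' := by
      intro c hc
      rcases hall c hc with h' | h'
      · have := (List.countP_eq_zero).1 hz0 c hc
        simp [h'] at this
      · exact h'
    match m, hne, hnd with
    | [c], _, hnd =>
        exact hnd (by rw [halldot c (by simp)])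
    | c1 :: c2 :: t, _, _ =>
        have e1 := halldot c1 (by simp)
        have e2 := halldot c2 (by simp)
        subst e1; subst e2
        simp at hdot

theorem vc_count_eq (l : List Char) : l.count '.' = l.countP (fun c => c == '.') := by
  simp [List.count_eq_countP]

-- A's result, characterised: all chars allowed, no '-' after position 0, at most one '.',
-- and not one of the four degenerate strings
theorem vcA_true_iff (l : List Char) :
    ((if (if l = [] ∨ l = ['.'] ∨ l = ['-'] ∨ l = ['-', '.'] then (0 : Int)
          else if l.count '.' > 1 then 0
          else if '-' ∈ l.drop 1 then 0
          else vcLoop l) = 1 then true else false) = true)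
    ↔ ((∀ c ∈ l, c ∈ vcNumbers) ∧ '-' ∉ l.drop 1 ∧ l.count '.' ≤ 1 ∧
        ¬ (l = [] ∨ l = ['.'] ∨ l = ['-'] ∨ l = ['-', '.'])) := by
  split_ifs with h1 h2 h3 h4 <;> simp_all [vcLoop_eq_one_iff]

-- B's result, characterised: at least one digit, only digits and dots, at most one dot
theorem vcB_true_iff (body : List Char) :
    ((decide (1 ≤ body.countP (fun c => c ∈ vcDigits)) &&
      (body.countP (fun c => c ∈ vcDigits) + body.countP (fun c => c == '.') == body.length) &&
      decide (body.countP (fun c => c == '.') ≤ 1)) = true)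
    ↔ (1 ≤ body.countP (fun c => c ∈ vcDigits) ∧ (∀ c ∈ body, c ∈ vcDigits ∨ c = '.') ∧
        body.countP (fun c => c == '.') ≤ 1) := by
  simp only [Bool.and_eq_true, decide_eq_true_eq, beq_iff_eq]
  constructor
  · rintro ⟨⟨hd, hs⟩, ht⟩; exact ⟨hd, vc_split_all _ hs, ht⟩
  · rintro ⟨hd, hs, ht⟩; exact ⟨⟨hd, vc_countP_split _ hs⟩, ht⟩

-- the two characterisations coincide, tail case shared between both head cases
theorem vc_iff_body (body : List Char)
    (hA : (∀ c ∈ body, c ∈ vcNumbers) ∧ '-' ∉ body ∧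
          body.countP (fun c => c == '.') ≤ 1 ∧ body ≠ [] ∧ body ≠ ['.']) :
    1 ≤ body.countP (fun c => c ∈ vcDigits) ∧ (∀ c ∈ body, c ∈ vcDigits ∨ c = '.') ∧
      body.countP (fun c => c == '.') ≤ 1 := by
  obtain ⟨hall, hmem, hdot, hne, hnd⟩ := hA
  have halldd : ∀ c ∈ body, c ∈ vcDigits ∨ c = '.' := by
    intro x hx
    exact (vc_char_iff x (fun hh => hmem (hh ▸ hx))).1 (hall x hx)
  exact ⟨(vc_digit_pos_iff body halldd hdot).2 ⟨hne, hnd⟩, halldd, hdot⟩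

theorem vc_iff_body' (body : List Char)
    (hB : 1 ≤ body.countP (fun c => c ∈ vcDigits) ∧ (∀ c ∈ body, c ∈ vcDigits ∨ c = '.') ∧
          body.countP (fun c => c == '.') ≤ 1) :
    (∀ c ∈ body, c ∈ vcNumbers) ∧ '-' ∉ body ∧
      body.countP (fun c => c == '.') ≤ 1 ∧ body ≠ [] ∧ body ≠ ['.'] := by
  obtain ⟨hdig, halldd, hdot⟩ := hB
  have hmem : '-' ∉ body := fun hm => vc_not_dash '-' (halldd '-' hm) rfl
  have hall : ∀ c ∈ body, c ∈ vcNumbers := by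
    intro x hx
    exact (vc_char_iff x (vc_not_dash x (halldd x hx))).2 (halldd x hx)
  have hne := (vc_digit_pos_iff body halldd hdot).1 hdig
  exact ⟨hall, hmem, hdot, hne.1, hne.2⟩

theorem vc_main (l : List Char) :
    (if (if l = [] ∨ l = ['.'] ∨ l = ['-'] ∨ l = ['-', '.'] then (0 : Int)
         else if l.count '.' > 1 then 0
         else if '-' ∈ l.drop 1 then 0
         else vcLoop l) = 1 then true else false) =
    (let body := if PySem.Chars.startswith l ['-'] then l.drop 1 else l
     decide (1 ≤ body.countP (fun c => c ∈ vcDigits)) &&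
       (body.countP (fun c => c ∈ vcDigits) + body.countP (fun c => c == '.') == body.length) &&
       decide (body.countP (fun c => c == '.') ≤ 1)) := by
  cases l with
  | nil => decide
  | cons c t =>
    have hstart : PySem.Chars.startswith (c :: t) ['-'] = (c == '-') := by
      rcases Bool.eq_false_or_eq_true (c == '-') with h | h
      · simp only [beq_iff_eq] at h
        simp only [h, beq_self_eq_true]
        rw [PySem.Chars.startswith_iff, List.cons_prefix_cons]
        simp
      · rw [h, Bool.eq_false_iff, Ne, PySem.Chars.startswith_iff, List.cons_prefix_cons]
        simp only [beq_eq_false_iff_ne, Ne] at h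
        rintro ⟨hh, -⟩
        exact h hh.symm
    simp only [hstart]
    by_cases hc : c = '-'
    · subst hc
      simp only [beq_self_eq_true, if_true]
      apply Bool.coe_iff_coe.mp
      rw [vcA_true_iff, vcB_true_iff]
      simp only [List.drop_succ_cons, List.drop_zero]
      constructor
      · rintro ⟨hall, hmem, hcnt, hdeg⟩
        apply vc_iff_body
        refine ⟨fun x hx => hall x (by simp [hx]), hmem, ?_, ?_, ?_⟩
        · rw [vc_count_eq] at hcnt
          simp only [List.countP_cons] at hcnt
          simp at hcnt
          omega
        · intro hh; exact hdeg (by simp [hh])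
        · intro hh; exact hdeg (by simp [hh])
      · intro hB
        obtain ⟨hall, hmem, hdot, hne, hnd⟩ := vc_iff_body' t hB
        refine ⟨?_, hmem, ?_, ?_⟩
        · intro x hx
          rcases List.mem_cons.1 hx with rfl | hx'
          · decide
          · exact hall x hx'
        · rw [vc_count_eq]
          simp only [List.countP_cons]
          simp
          omega
        · simp only [List.cons.injEq, reduceCtorEq, false_or, not_or]
          refine ⟨by simp, ?_, ?_⟩
          · simp only [true_and]; exact hne
          · simp only [true_and]; exact hnd
    · have hcb : (c == '-') = false := by simp [hc]
      simp only [hcb, Bool.false_eq_true, if_false]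
      apply Bool.coe_iff_coe.mp
      rw [vcA_true_iff, vcB_true_iff]
      simp only [List.drop_succ_cons, List.drop_zero]
      constructor
      · rintro ⟨hall, hmem, hcnt, hdeg⟩
        apply vc_iff_body
        refine ⟨hall, ?_, ?_, by simp, ?_⟩
        · intro hm
          rcases List.mem_cons.1 hm with hh | hh
          · exact hc hh.symm
          · exact hmem hh
        · rw [vc_count_eq] at hcnt; exact hcnt
        · intro hh; exact hdeg (by simp [hh])
      · intro hB
        obtain ⟨hall, hmem, hdot, hne, hnd⟩ := vc_iff_body' (c :: t) hB
        refine ⟨hall, fun hm => hmem (by simp [hm]), ?_, ?_⟩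
        · rw [vc_count_eq]; exact hdot
        · simp only [not_or]
          refine ⟨by simp, hnd, ?_, ?_⟩
          · simp only [List.cons.injEq]; rintro ⟨rfl, -⟩; exact hc rfl
          · simp only [List.cons.injEq]; rintro ⟨rfl, -⟩; exact hc rfl

-- ===== VERDICT (by name: the statement is the Claim_ definition above) =====
theorem valid_coordinate_spec : Claim_equal_valid_coordinate := by
  intro text _
  unfold Spec_valid_coordinate valid_coordinate valid_coordinate_alt
  exact vc_main text.toList
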